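-- pv_equiv track=rewrite | github.com/krenak/BSI | 2024-2/prog2/exercicios/dicionario/lista2/lista2/comprimentoL2.py | comprimento
-- ===== SOURCE A (Python) =====
-- def comprimento(d):
--     # letrasDicio = {0: 'a', 1: 'b', 2: 'c', 3: 'd', 4: 'e', 5: 'f', 6: 'g', 7: 'h', 8: 'i', 9: 'j', 10: 'k', 11: 'l', 12: 'm', 13: 'n', 14: 'o', 15: 'p', 16: 'q', 17: 'r', 18: 's', 19: 't', 20: 'u', 21: 'v', 22: 'w', 23: 'x', 24: 'y', 25: 'z'}
--     cc = {}
--     palavras = d.split()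
--     for p in range(len(palavras)):
--         for l in palavras[p]:
--             cont = 1
--             chaves = cc.keys()
--             if l not in chaves:
--                 cc[l] = cont
--                 cont = 0
--             else:
--                 cc[l] = cont + 1
--     return cc
-- ===== SOURCE B (Python) =====
-- def comprimento(d):
--     # count first, reshape second: full frequency table, then cap values at 2
--     counts = {}
--     for w in d.split():
--         for ch in w:
--             counts[ch] = counts.get(ch, 0) + 1
--     return {ch: (1 if n == 1 else 2) for ch, n in counts.items()}
-- ===== Notes on version B (the rewrite author's own statement) =====
-- stated objective: simpler
-- what changed: A maintains the capped dict incrementally with a membership-test branch inside the char loop; B first builds a full character-frequency table in one counting pass and then reshapes it in a separate pass, mapping each count n to 1 if n == 1 else 2.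
import Mathlib
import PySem

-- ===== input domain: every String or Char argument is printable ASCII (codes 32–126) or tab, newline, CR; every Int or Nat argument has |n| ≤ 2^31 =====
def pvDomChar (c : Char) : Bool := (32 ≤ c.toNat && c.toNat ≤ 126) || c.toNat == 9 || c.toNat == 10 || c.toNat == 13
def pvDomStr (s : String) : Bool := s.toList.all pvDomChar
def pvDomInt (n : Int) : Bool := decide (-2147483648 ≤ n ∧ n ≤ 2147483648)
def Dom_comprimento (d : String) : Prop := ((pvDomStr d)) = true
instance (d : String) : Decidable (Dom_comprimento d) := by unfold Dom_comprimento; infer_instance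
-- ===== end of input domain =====

-- B replaces A's inline incremental capping with a count-first, reshape-second
-- decomposition (full frequency table, then a separate capping pass); objective: simpler.

-- ===== PORT A =====
-- A's inner loop over the chars of one word ('for l in palavras[p]: ...')
def pvWordStep (cc : PySem.Dict String Int) (w : String) : PySem.Dict String Int :=
  w.toList.foldl (fun cc l =>
      -- cont = 1; cont's reassignment to 0 in the first branch is dead in A
      let cont : Int := 1
      if (cc.contains (String.mk [l])) = false then cc.insert (String.mk [l]) cont
      else cc.insert (String.mk [l]) (cont + 1))
    cc

-- one pass: insert 1 on first sight of a char, overwrite with 2 afterwards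
def comprimento (d : String) : List (String × Int) :=
  let palavras := PySem.Str.split₀ d
  ((PySem.List.pyRange 0 (PySem.List.len palavras) 1).foldl (fun cc p =>
      pvWordStep cc (PySem.List.pyGetD palavras p ""))
    PySem.Dict.empty).items

-- ===== PORT B =====
-- phase 1: full character-frequency table; phase 2: cap each count at 2
def comprimento_alt (d : String) : List (String × Int) :=
  let counts : PySem.Dict String Int := (PySem.Str.split₀ d).foldl (fun cnt w =>
      w.toList.foldl (fun cnt c =>
          cnt.insert (String.mk [c]) (cnt.getD (String.mk [c]) 0 + 1))
        cnt)
    PySem.Dict.empty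
  counts.items.map (fun p => (p.1, if p.2 == 1 then (1 : Int) else 2))

-- ===== PRECONDITION & SPEC =====
def Spec_comprimento (d : String) (out : List (String × Int)) : Prop := out = comprimento_alt d
instance (d : String) (out : List (String × Int)) : Decidable (Spec_comprimento d out) := by unfold Spec_comprimento; infer_instance

-- ===== CLAIM (what is proved, stated in full; the proofs are below) =====
def Claim_equal_comprimento : Prop := ∀ (d : String), Dom_comprimento d → Spec_comprimento d (comprimento d)

-- ===== LEMMAS AND PROOFS =====

-- A's loop body, with the key already formed
def pvStepA (cc : PySem.Dict String Int) (k : String) : PySem.Dict String Int :=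
  if (cc.contains k) = false then cc.insert k 1 else cc.insert k 2

-- A's dict over any key list: first-appearance keys, value 1 iff the key occurs once
theorem pvFoldA_items (cs : List String) :
    (cs.foldl pvStepA PySem.Dict.empty).items
      = (PySem.Set.ofList cs).map (fun k => (k, if cs.count k = 1 then (1 : Int) else 2)) := by
  induction cs using List.reverseRecOn with
  | nil => rfl
  | append_singleton cs x ih =>
    rw [List.foldl_append, List.foldl_cons, List.foldl_nil]
    have hkeys : (cs.foldl pvStepA PySem.Dict.empty).keys = PySem.Set.ofList cs := by
      have h := congrArg (List.map Prod.fst) ih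
      simp only [List.map_map, Function.comp_def] at h
      simp only [PySem.Dict.keys]
      simpa using h
    have hset : PySem.Set.ofList (cs ++ [x])
        = PySem.Set.add (PySem.Set.ofList cs) x := by
      rw [PySem.Set.ofList_eq_foldl, List.foldl_append, ← PySem.Set.ofList_eq_foldl]
      rfl
    by_cases hx : x ∈ cs
    · have hcont : (cs.foldl pvStepA PySem.Dict.empty).contains x = true := by
        rw [PySem.Dict.contains_iff_mem_keys, hkeys, PySem.Set.mem_ofList]; exact hx
      have hadd : PySem.Set.add (PySem.Set.ofList cs) x = PySem.Set.ofList cs := by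
        simp [PySem.Set.add, PySem.Set.contains, PySem.Set.mem_ofList, hx]
      rw [pvStepA, hcont]
      simp only [Bool.true_eq_false, if_false]
      rw [PySem.Dict.items_insert_of_contains _ _ hcont, ih, hset, hadd, List.map_map]
      refine List.map_congr_left (fun k hk => ?_)
      by_cases hkx : k = x
      · subst hkx
        have h1 : 1 ≤ cs.count k := List.one_le_count_iff.mpr hx
        have h0 : cs.count k ≠ 0 := by omega
        simp [Function.comp, List.count_append, h0]
      · simp [Function.comp, hkx, List.count_append,
          List.count_singleton, if_neg (Ne.symm hkx)]
    · have hcont : (cs.foldl pvStepA PySem.Dict.empty).contains x = false := by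
        rw [← Bool.not_eq_true, PySem.Dict.contains_iff_mem_keys, hkeys, PySem.Set.mem_ofList]
        exact hx
      have hadd : PySem.Set.add (PySem.Set.ofList cs) x = PySem.Set.ofList cs ++ [x] := by
        simp [PySem.Set.add, PySem.Set.contains, PySem.Set.mem_ofList, hx]
      rw [pvStepA, hcont]
      simp only [if_true]
      rw [PySem.Dict.items_insert_of_not_contains _ _ hcont, ih, hset, hadd, List.map_append]
      congr 1
      · refine List.map_congr_left (fun k hk => ?_)
        have hkx : k ≠ x := fun h => hx (by
          rw [← h]; exact (PySem.Set.mem_ofList cs k).mp hk)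
        simp [List.count_append, List.count_singleton, if_neg (Ne.symm hkx)]
      · have h0 : cs.count x = 0 := List.count_eq_zero.mpr hx
        simp [List.count_append, h0]

def pvChars (d : String) : List String :=
  (PySem.Str.split₀ d).flatMap (fun w => w.toList.map (fun c => String.mk [c]))

-- a fold of the char-keyed step over two nested loops is the fold over the flattened key list
theorem pvNested (g : PySem.Dict String Int → String → PySem.Dict String Int)
    (ws : List String) (init : PySem.Dict String Int) :
    ws.foldl (fun acc w => w.toList.foldl (fun acc c => g acc (String.mk [c])) acc) init
      = (ws.flatMap (fun w => w.toList.map (fun c => String.mk [c]))).foldl g init := by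
  rw [List.foldl_flatMap]
  simp [List.foldl_map]

-- A's nested loops are the single A-step fold over the flattened key list
theorem pvA_eq (d : String) :
    comprimento d = ((pvChars d).foldl pvStepA PySem.Dict.empty).items := by
  unfold comprimento pvChars
  dsimp only
  rw [PySem.List.foldl_pyRange_pyGetD (PySem.Str.split₀ d) "" pvWordStep PySem.Dict.empty le_rfl,
      Int.toNat_zero, List.drop_zero]
  have hw : pvWordStep = fun cc w => w.toList.foldl (fun cc c => pvStepA cc (String.mk [c])) cc := by
    funext cc w
    rfl
  rw [hw]
  exact congrArg PySem.Dict.items (pvNested pvStepA (PySem.Str.split₀ d) PySem.Dict.empty)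

-- B's counting loop is the same fold shape over the same flattened key list
theorem pvB_eq (d : String) :
    comprimento_alt d
      = ((pvChars d).foldl (fun (cnt : PySem.Dict String Int) k => cnt.insert k (cnt.getD k 0 + 1))
          PySem.Dict.empty).items.map (fun p => (p.1, if p.2 == 1 then (1 : Int) else 2)) := by
  unfold comprimento_alt pvChars
  dsimp only
  have h := pvNested (fun cnt k => cnt.insert k (cnt.getD k 0 + 1)) (PySem.Str.split₀ d)
    PySem.Dict.empty
  rw [h]


-- ===== VERDICT (by name: the statement is the Claim_ definition above) =====
theorem comprimento_spec : Claim_equal_comprimento := by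
  intro d _
  show comprimento d = comprimento_alt d
  rw [pvA_eq, pvB_eq]
  rw [PySem.Dict.foldl_insert_getD_add_one_eq_counter, PySem.Dict.items_counter,
    List.map_map, pvFoldA_items]
  refine List.map_congr_left (fun k hk => ?_)
  by_cases h : (pvChars d).count k = 1
  · simp [Function.comp, h]
  · have h' : ((pvChars d).count k : Int) ≠ 1 := by exact_mod_cast h
    simp [Function.comp, h, h']
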